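-- pv_equiv track=rewrite | github.com/nathancoulson/prediction_app | Modelling_Module/model_evaluation_lstm.py | get_reqset_bias
-- ===== SOURCE A (Python) =====
-- def get_reqset_bias(dictionary):
--     """
--     Count number of requests for each app bias
--     """
--
--     bias_2 = sum(
--         [v for k, v in dictionary.items() if "-bias-2" in k]
--     )
--     bias_3 = sum(
--         [v for k, v in dictionary.items() if "-bias-3" in k]
--     )
--     bias_4 = sum(
--         [v for k, v in dictionary.items() if "-bias-4" in k]
--     )
--
--     return (bias_2, bias_3, bias_4)
-- ===== SOURCE B (Python) =====
-- def get_reqset_bias(dictionary):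
--     """
--     Count number of requests for each app bias
--     """
--     b2 = b3 = b4 = 0
--     for k, v in dictionary.items():
--         # One sliding-window scan of the key for the shared tag "-bias-",
--         # dispatching on the character that follows it.
--         has2 = has3 = has4 = False
--         for i in range(len(k) - 6):
--             if k[i:i + 6] == "-bias-":
--                 c = k[i + 6]
--                 if c == '2':
--                     has2 = True
--                 elif c == '3':
--                     has3 = True
--                 elif c == '4':
--                     has4 = True
--         if has2:
--             b2 += v
--         if has3:
--             b3 += v
--         if has4:
--             b4 += v
--     return (b2, b3, b4)
-- ===== Notes on version B (the rewrite author's own statement) =====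
-- stated objective: alternative
-- what changed: Instead of three filtered-comprehension passes each doing a full substring-membership test, B makes one pass over items() and scans each key once with a sliding 7-character window for the shared tag '-bias-', dispatching on the character that follows it to set per-tag flags.
import Mathlib
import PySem

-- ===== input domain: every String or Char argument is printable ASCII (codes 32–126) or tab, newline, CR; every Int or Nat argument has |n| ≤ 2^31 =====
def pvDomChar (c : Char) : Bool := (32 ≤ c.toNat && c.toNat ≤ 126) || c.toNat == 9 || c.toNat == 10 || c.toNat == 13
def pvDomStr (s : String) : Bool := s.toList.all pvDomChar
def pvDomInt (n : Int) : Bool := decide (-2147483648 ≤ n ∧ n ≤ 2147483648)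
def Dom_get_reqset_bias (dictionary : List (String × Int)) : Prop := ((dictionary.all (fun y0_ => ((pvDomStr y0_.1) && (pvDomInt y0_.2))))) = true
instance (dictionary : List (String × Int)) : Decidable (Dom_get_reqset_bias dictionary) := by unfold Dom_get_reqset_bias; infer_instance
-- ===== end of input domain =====

-- B replaces A's three filtered-comprehension substring searches with a single sliding-window
-- scan of each key for the shared tag "-bias-", dispatching on the character after it
-- (objective: alternative — one pattern scan with dispatch instead of three membership tests).


-- ===== PORT A =====
-- sum([v for k, v in dictionary.items() if "-bias-N" in k]) for N = 2, 3, 4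
def get_reqset_bias (dictionary : List (String × Int)) : Int × Int × Int :=
  let bias_2 := ((dictionary.filter (fun p => PySem.Str.isIn "-bias-2" p.1)).map Prod.snd).sum
  let bias_3 := ((dictionary.filter (fun p => PySem.Str.isIn "-bias-3" p.1)).map Prod.snd).sum
  let bias_4 := ((dictionary.filter (fun p => PySem.Str.isIn "-bias-4" p.1)).map Prod.snd).sum
  (bias_2, bias_3, bias_4)

-- ===== PORT B =====
-- the 6-character shared tag "-bias-"
def pvTag : List Char := "-bias-".toList

-- Source B's inner loop: slide over the positions of the key (here: its suffixes), and at each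
-- position where the window matches "-bias-" and a 7th character exists, dispatch on that
-- character, setting the corresponding flag.
def pvTagScan : List Char → Bool × Bool × Bool
  | [] => (false, false, false)
  | c :: rest =>
    let (t2, t3, t4) := pvTagScan rest
    if pvTag.isPrefixOf (c :: rest) then
      match (c :: rest).drop 6 with
      | d :: _ =>
          if d = '2' then (true, t3, t4)
          else if d = '3' then (t2, true, t4)
          else if d = '4' then (t2, t3, true)
          else (t2, t3, t4)
      | [] => (t2, t3, t4)
    else (t2, t3, t4)

-- outer loop: one pass over items(), adding v to the accumulators whose flag is set
def get_reqset_bias_alt (dictionary : List (String × Int)) : Int × Int × Int :=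
  dictionary.foldl
    (fun acc p =>
      let h := pvTagScan p.1.toList
      (if h.1 then acc.1 + p.2 else acc.1,
       if h.2.1 then acc.2.1 + p.2 else acc.2.1,
       if h.2.2 then acc.2.2 + p.2 else acc.2.2))
    (0, 0, 0)

-- ===== PRECONDITION & SPEC =====
def Spec_get_reqset_bias (dictionary : List (String × Int)) (out : Int × Int × Int) : Prop := out = get_reqset_bias_alt dictionary
instance (dictionary : List (String × Int)) (out : Int × Int × Int) : Decidable (Spec_get_reqset_bias dictionary out) := by unfold Spec_get_reqset_bias; infer_instance

-- ===== CLAIM (what is proved, stated in full; the proofs are below) =====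
def Claim_equal_get_reqset_bias : Prop := ∀ (dictionary : List (String × Int)), Dom_get_reqset_bias dictionary → Spec_get_reqset_bias dictionary (get_reqset_bias dictionary)

-- ===== LEMMAS AND PROOFS =====

-- "-bias-d" is a prefix of cs iff "-bias-" is and the 7th character is d
theorem prefix_tag_snoc (cs : List Char) (d : Char) :
    (pvTag ++ [d]) <+: cs ↔ pvTag <+: cs ∧ (cs.drop 6).head? = some d := by
  constructor
  · rintro ⟨t, rfl⟩
    refine ⟨⟨[d] ++ t, by simp⟩, ?_⟩
    simp [pvTag]
  · rintro ⟨⟨t, rfl⟩, h⟩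
    have hdt : List.drop 6 (pvTag ++ t) = t := by simp [pvTag]
    rw [hdt] at h
    match t, h with
    | d' :: t', h =>
      simp only [List.head?_cons, Option.some.injEq] at h
      subst h
      exact ⟨t', by simp⟩

-- the scan computes exactly the three substring-membership flags
theorem pvTagScan_eq (cs : List Char) :
    pvTagScan cs
      = (decide ((pvTag ++ ['2']) <:+: cs),
         decide ((pvTag ++ ['3']) <:+: cs),
         decide ((pvTag ++ ['4']) <:+: cs)) := by
  induction cs with
  | nil => simp [pvTagScan]
  | cons c rest ih =>
    have hinf : ∀ d : Char,
        ((pvTag ++ [d]) <:+: (c :: rest)) ↔ ((pvTag ++ [d]) <+: (c :: rest)) ∨ ((pvTag ++ [d]) <:+: rest) :=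
      fun d => List.infix_cons_iff
    rw [pvTagScan, ih]
    dsimp only
    by_cases hp : pvTag <+: (c :: rest)
    · rw [if_pos (List.isPrefixOf_iff_prefix.mpr hp)]
      cases hd : (c :: rest).drop 6 with
      | nil =>
        have hnp : ∀ d : Char, ¬ ((pvTag ++ [d]) <+: (c :: rest)) := by
          intro d hpre
          have := (prefix_tag_snoc _ d).mp hpre
          rw [hd] at this; simp at this
        simp only [Prod.mk.injEq]
        refine ⟨?_, ?_, ?_⟩ <;>
          simp [hinf, hnp]
      | cons d rest' =>
        have hpre : ∀ x : Char, ((pvTag ++ [x]) <+: (c :: rest)) ↔ d = x := by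
          intro x
          rw [prefix_tag_snoc, hd]
          simp [hp]
        by_cases h2 : d = '2' <;> by_cases h3 : d = '3' <;> by_cases h4 : d = '4' <;>
          simp_all
    · rw [if_neg (fun h => hp (List.isPrefixOf_iff_prefix.mp h))]
      have hnp : ∀ d : Char, ¬ ((pvTag ++ [d]) <+: (c :: rest)) := by
        intro d hpre
        exact hp ((prefix_tag_snoc _ d).mp hpre).1
      simp only [Prod.mk.injEq]
      refine ⟨?_, ?_, ?_⟩ <;> simp [hinf, hnp]

-- Str.isIn as a decide over infix on the character lists
theorem isIn_eq_decide (sub s : String) :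
    PySem.Str.isIn sub s = decide (sub.toList <:+: s.toList) := by
  rw [show PySem.Str.isIn sub s = PySem.Chars.isIn sub.toList s.toList from by simp]
  by_cases h : sub.toList <:+: s.toList
  · rw [decide_eq_true h]
    exact (PySem.Chars.isIn_iff_infix _ _).mpr h
  · rw [decide_eq_false h]
    exact (PySem.Chars.isIn_eq_false_iff _ _).mpr h

-- pointwise: B's fold step with the scanned flags is the fold step with the three membership tests
theorem step_eq :
    (fun (acc : Int × Int × Int) (p : String × Int) =>
      let h := pvTagScan p.1.toList
      (if h.1 then acc.1 + p.2 else acc.1,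
       if h.2.1 then acc.2.1 + p.2 else acc.2.1,
       if h.2.2 then acc.2.2 + p.2 else acc.2.2))
    = (fun (acc : Int × Int × Int) (p : String × Int) =>
      (if PySem.Str.isIn "-bias-2" p.1 then acc.1 + p.2 else acc.1,
       if PySem.Str.isIn "-bias-3" p.1 then acc.2.1 + p.2 else acc.2.1,
       if PySem.Str.isIn "-bias-4" p.1 then acc.2.2 + p.2 else acc.2.2)) := by
  funext acc p
  have e2 : PySem.Str.isIn "-bias-2" p.1 = decide ((pvTag ++ ['2']) <:+: p.1.toList) := by
    rw [isIn_eq_decide]; rfl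
  have e3 : PySem.Str.isIn "-bias-3" p.1 = decide ((pvTag ++ ['3']) <:+: p.1.toList) := by
    rw [isIn_eq_decide]; rfl
  have e4 : PySem.Str.isIn "-bias-4" p.1 = decide ((pvTag ++ ['4']) <:+: p.1.toList) := by
    rw [isIn_eq_decide]; rfl
  simp only [pvTagScan_eq, e2, e3, e4]

-- the single pass with the membership-test step accumulates exactly the three filtered sums
theorem foldl_isIn_eq (d : List (String × Int)) (a b c : Int) :
    d.foldl
      (fun acc p =>
        (if PySem.Str.isIn "-bias-2" p.1 then acc.1 + p.2 else acc.1,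
         if PySem.Str.isIn "-bias-3" p.1 then acc.2.1 + p.2 else acc.2.1,
         if PySem.Str.isIn "-bias-4" p.1 then acc.2.2 + p.2 else acc.2.2))
      (a, b, c)
    = (a + ((d.filter (fun p => PySem.Str.isIn "-bias-2" p.1)).map Prod.snd).sum,
       b + ((d.filter (fun p => PySem.Str.isIn "-bias-3" p.1)).map Prod.snd).sum,
       c + ((d.filter (fun p => PySem.Str.isIn "-bias-4" p.1)).map Prod.snd).sum) := by
  induction d generalizing a b c with
  | nil => simp
  | cons hd tl ih =>
      simp only [List.foldl_cons, List.filter_cons]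
      cases h2 : PySem.Str.isIn "-bias-2" hd.1 <;>
        cases h3 : PySem.Str.isIn "-bias-3" hd.1 <;>
          cases h4 : PySem.Str.isIn "-bias-4" hd.1 <;>
            simp only [Bool.false_eq_true, if_true, if_false,
              List.map_cons, List.sum_cons, ih, Prod.mk.injEq, true_and, and_true] <;>
            omega

-- ===== VERDICT (by name: the statement is the Claim_ definition above) =====
theorem get_reqset_bias_spec : Claim_equal_get_reqset_bias := by
  intro d _
  show get_reqset_bias d = get_reqset_bias_alt d
  simp only [get_reqset_bias, get_reqset_bias_alt]
  rw [step_eq, foldl_isIn_eq d 0 0 0]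
  simp only [zero_add]
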